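-- pv_equiv track=rewrite | github.com/haaaein/BigData-Processing | practice/practice7.py | make_new_list
-- ===== SOURCE A (Python) =====
-- def make_new_list(listA):
--   B = []
--   for i in listA:
--     num = 1
--     for j in listA:
--       if j != i:
--         num *= j
--     B.append(len(str(num)))
--   return B
-- ===== SOURCE B (Python) =====
-- def make_new_list(listA):
--     # Alternative: total product of the nonzero elements + a value counter,
--     # then each answer by exact integer division (zeros special-cased).
--     cnt = {}
--     for x in listA:
--         cnt[x] = cnt.get(x, 0) + 1
--     zeros = cnt.get(0, 0)
--     T = 1
--     for x in listA:
--         if x != 0: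
--             T *= x
--     out = []
--     for i in listA:
--         if zeros > 0 and i != 0:
--             num = 0
--         elif i == 0:
--             num = T
--         else:
--             num = T // i ** cnt[i]
--         out.append(len(str(num)))
--     return out
-- ===== Notes on version B (the rewrite author's own statement) =====
-- stated objective: alternative
-- what changed: Replaces the quadratic per-element re-multiplication with one pass computing the total nonzero product and a value counter, then obtains each entry by exact integer division T // i**count(i), with zeros special-cased; fewer multiplications, but big-integer division still dominates at large sizes.
import Mathlib
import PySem

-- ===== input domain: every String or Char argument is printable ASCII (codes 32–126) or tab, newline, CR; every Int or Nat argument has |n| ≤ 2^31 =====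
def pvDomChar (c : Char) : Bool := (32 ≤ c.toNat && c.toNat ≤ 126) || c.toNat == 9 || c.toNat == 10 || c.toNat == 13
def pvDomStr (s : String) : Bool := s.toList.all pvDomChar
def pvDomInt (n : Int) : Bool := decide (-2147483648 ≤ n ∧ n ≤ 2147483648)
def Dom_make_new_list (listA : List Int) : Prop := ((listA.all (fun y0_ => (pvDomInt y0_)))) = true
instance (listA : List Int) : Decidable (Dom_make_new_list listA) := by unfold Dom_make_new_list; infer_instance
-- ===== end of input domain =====

-- B replaces A's quadratic per-element re-multiplication by one total-product pass
-- plus a value counter and exact integer division (objective: alternative algorithm).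


-- ===== PORT A =====
-- for i in listA: num = 1; for j in listA: if j != i: num *= j; B.append(len(str(num)))
def make_new_list (listA : List Int) : List Int :=
  listA.foldl
    (fun B i =>
      B ++ [PySem.Str.len (PySem.Int.toStr
        (listA.foldl (fun num j => if j ≠ i then num * j else num) 1))])
    []

-- ===== PORT B =====
-- counter pass, nonzero total-product pass, then one exact division per element
def make_new_list_alt (listA : List Int) : List Int :=
  let cnt : PySem.Dict Int Int :=
    listA.foldl (fun d x => d.insert x (d.getD x 0 + 1)) PySem.Dict.empty
  let zeros : Int := cnt.getD 0 0
  let T : Int := listA.foldl (fun T x => if x ≠ 0 then T * x else T) 1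
  listA.foldl
    (fun out i =>
      let num : Int :=
        if zeros > 0 ∧ i ≠ 0 then 0
        else if i = 0 then T
        -- i ** cnt[i]: the exponent is a positive count, so `^ (… ).toNat` is exact
        else PySem.Int.floordiv T (i ^ (cnt.getD i 0).toNat)
      out ++ [PySem.Str.len (PySem.Int.toStr num)])
    []

-- ===== PRECONDITION & SPEC =====
def Spec_make_new_list (listA : List Int) (out : List Int) : Prop := out = make_new_list_alt listA
instance (listA : List Int) (out : List Int) : Decidable (Spec_make_new_list listA out) := by unfold Spec_make_new_list; infer_instance

-- ===== CLAIM (what is proved, stated in full; the proofs are below) =====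
def Claim_equal_make_new_list : Prop := ∀ (listA : List Int), Dom_make_new_list listA → Spec_make_new_list listA (make_new_list listA)

-- ===== LEMMAS AND PROOFS =====

/-- The append-accumulator loop is a map. -/
theorem pv_foldl_append (f : Int → Int) : ∀ (l : List Int) (acc : List Int),
    l.foldl (fun B i => B ++ [f i]) acc = acc ++ l.map f := by
  intro l
  induction l with
  | nil => simp
  | cons a l ih => intro acc; simp [List.foldl_cons, ih]

/-- The conditional product loop is the product of a filter. -/
theorem pv_foldl_mul (i : Int) : ∀ (l : List Int) (init : Int),
    l.foldl (fun num j => if j ≠ i then num * j else num) init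
      = init * (l.filter (fun j => decide (j ≠ i))).prod := by
  intro l
  induction l with
  | nil => simp
  | cons a l ih =>
    intro init
    by_cases h : a = i
    · rw [List.foldl_cons, if_neg (not_not_intro h), List.filter_cons,
        if_neg (by simp [h]), ih]
    · rw [List.foldl_cons, if_pos h, List.filter_cons, if_pos (by simp [h]),
        ih, List.prod_cons]
      ring

/-- Splitting off all occurrences of a value from a product. -/
theorem pv_prod_split (i : Int) : ∀ (l : List Int),
    l.prod = (l.filter (fun j => decide (j ≠ i))).prod * i ^ (l.count i) := by
  intro l
  induction l with
  | nil => simp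
  | cons a l ih =>
    by_cases h : a = i
    · subst h
      rw [List.prod_cons, List.filter_cons, if_neg (by simp), List.count_cons_self,
        ih, pow_succ]
      ring
    · rw [List.prod_cons, List.filter_cons, if_pos (by simp [h]),
        List.count_cons_of_ne (a := i) (b := a) (by omega), ih, List.prod_cons]
      ring

theorem pv_filter_ne_zero (l : List Int) (h : l.count 0 = 0) :
    l.filter (fun x => decide (x ≠ 0)) = l := by
  rw [List.filter_eq_self]
  intro x hx
  simp only [decide_eq_true_eq]
  intro hx0
  subst hx0
  rw [List.count_eq_zero] at h
  exact h hx

theorem make_new_list_spec : Claim_equal_make_new_list := by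
  intro listA _
  unfold Spec_make_new_list make_new_list make_new_list_alt
  simp only [PySem.Dict.foldl_insert_getD_add_one_eq_counter]
  rw [pv_foldl_append, pv_foldl_append, List.nil_append, List.nil_append]
  apply List.map_congr_left
  intro i _
  apply congrArg
  apply congrArg
  rw [pv_foldl_mul i, one_mul, pv_foldl_mul 0, one_mul]
  by_cases h1 : (PySem.Dict.counter listA).getD 0 0 > 0 ∧ i ≠ 0
  · rw [if_pos h1]
    have h0 : (0 : Int) ∈ listA := by
      have hc := h1.1
      rw [PySem.Dict.getD_counter] at hc
      exact List.count_pos_iff.mp (by exact_mod_cast hc)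
    exact List.prod_eq_zero (List.mem_filter.mpr ⟨h0, by
      simp only [decide_eq_true_eq]; exact fun e => h1.2 e.symm⟩)
  · rw [if_neg h1]
    by_cases h2 : i = 0
    · subst h2; rw [if_pos rfl]
    · rw [if_neg h2]
      have hz : listA.count 0 = 0 := by
        rcases not_and_or.mp h1 with h | h
        · have hg := PySem.Dict.getD_counter listA (0 : Int)
          rw [hg] at h
          omega
        · exact absurd (not_not.mp h) h2
      rw [pv_filter_ne_zero listA hz, PySem.Dict.getD_counter, Int.toNat_natCast,
        show listA.prod = (listA.filter (fun j => decide (j ≠ i))).prod * i ^ (listA.count i)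
          from pv_prod_split i listA]
      exact (Int.mul_fdiv_cancel _ (pow_ne_zero _ h2)).symm
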